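-- pv_equiv track=rewrite | github.com/tuanpham-dev/ulauncher-better-calculator | main.py | fix_missing_brackets
-- ===== SOURCE A (Python) =====
-- def fix_missing_brackets(expression):
--     open_bracket_count = 0
--     close_bracket_count = 0
--     pending_brackets = []
--
--     for char in expression:
--         if char == '(':
--             open_bracket_count += 1
--         elif char == ')':
--             if open_bracket_count > close_bracket_count:
--                 close_bracket_count += 1
--             else:
--                 pending_brackets.append('(')
--
--     missing_close_brackets = open_bracket_count - close_bracket_count
--     expression = ''.join(pending_brackets) + expression
--     expression += ')' * missing_close_brackets
--
--     return expression
-- ===== SOURCE B (Python) =====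
-- def fix_missing_brackets(expression):
--     reduced = ''.join(c for c in expression if c in '()')
--     while '()' in reduced:
--         reduced = reduced.replace('()', '')
--     return '(' * reduced.count(')') + expression + ')' * reduced.count('(')
-- ===== Notes on version B (the rewrite author's own statement) =====
-- stated objective: alternative
-- what changed: B replaces A's single counting pass (open/close counters plus a pending-bracket list) with a fixpoint reduction: it filters the brackets, repeatedly deletes all matched '()' pairs via str.replace until none remain, and pads with the counts of the leftover ')' and '(' characters.
import Mathlib
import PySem

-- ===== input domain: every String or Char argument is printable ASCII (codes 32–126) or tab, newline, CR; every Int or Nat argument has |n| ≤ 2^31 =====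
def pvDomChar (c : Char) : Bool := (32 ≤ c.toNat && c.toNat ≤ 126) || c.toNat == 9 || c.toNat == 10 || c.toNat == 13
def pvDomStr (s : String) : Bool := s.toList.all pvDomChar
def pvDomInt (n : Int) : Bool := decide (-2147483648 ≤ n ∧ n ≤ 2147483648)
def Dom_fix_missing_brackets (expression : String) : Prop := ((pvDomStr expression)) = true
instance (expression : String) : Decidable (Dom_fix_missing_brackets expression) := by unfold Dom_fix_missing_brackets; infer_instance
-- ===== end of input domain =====

-- B replaces A's counting pass with a fixpoint reduction: repeatedly delete matched '()'
-- pairs, then count the leftover brackets (objective: alternative).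

-- ===== PORT A =====
-- loop body of A: state = (open_bracket_count, close_bracket_count, pending_brackets)
def fmbStepA (s : Int × Int × List Char) (ch : Char) : Int × Int × List Char :=
  if ch = '(' then (s.1 + 1, s.2.1, s.2.2)
  else if ch = ')' then
    if s.1 > s.2.1 then (s.1, s.2.1 + 1, s.2.2)
    else (s.1, s.2.1, s.2.2 ++ ['('])
  else s

def fix_missing_brackets (expression : String) : String :=
  let st := expression.toList.foldl fmbStepA (0, 0, [])
  let missing := st.1 - st.2.1
  String.mk (st.2.2 ++ expression.toList ++ List.replicate missing.toNat ')')

-- ===== PORT B =====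
-- `c in '()'`
def fmbIsBracket (c : Char) : Bool := c = '(' || c = ')'

-- `reduced.replace('()', '')`: delete all non-overlapping '()' occurrences, left to right
def fmbRepl : List Char → List Char
  | '(' :: ')' :: t => fmbRepl t
  | c :: t => c :: fmbRepl t
  | [] => []

-- `'()' in reduced`
def fmbHasPair : List Char → Bool
  | [] => false
  | [_] => false
  | a :: b :: t => (a = '(' && b = ')') || fmbHasPair (b :: t)

lemma fmbRepl_length_le (l : List Char) : (fmbRepl l).length ≤ l.length := by
  fun_induction fmbRepl l <;> simp <;> omega

lemma fmbRepl_length_lt (l : List Char) (h : fmbHasPair l = true) :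
    (fmbRepl l).length < l.length := by
  fun_induction fmbRepl l with
  | case1 t ih =>
    have := fmbRepl_length_le t
    simp only [List.length_cons]
    omega
  | case2 c t hne ih =>
    cases t with
    | nil => simp [fmbHasPair] at h
    | cons b t' =>
      have hcb : ¬(c = '(' ∧ b = ')') := fun ⟨h1, h2⟩ => hne t' h1 (by rw [h2])
      have hpt : fmbHasPair (b :: t') = true := by
        simp only [fmbHasPair, Bool.or_eq_true, Bool.and_eq_true, decide_eq_true_eq] at h
        rcases h with h | h
        · exact absurd h hcb
        · exact h
      have := ih hpt
      simp only [List.length_cons] at this ⊢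
      omega
  | case3 => simp [fmbHasPair] at h

-- `while '()' in reduced: reduced = reduced.replace('()', '')`
def fmbReduce (l : List Char) : List Char :=
  if h : fmbHasPair l = true then fmbReduce (fmbRepl l) else l
termination_by l.length
decreasing_by exact fmbRepl_length_lt l h

def fix_missing_brackets_alt (expression : String) : String :=
  let reduced := fmbReduce (expression.toList.filter fmbIsBracket)
  String.mk (List.replicate (reduced.count ')') '(' ++ expression.toList
             ++ List.replicate (reduced.count '(') ')')

-- ===== PRECONDITION & SPEC =====
def Spec_fix_missing_brackets (expression : String) (out : String) : Prop := out = fix_missing_brackets_alt expression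
instance (expression : String) (out : String) : Decidable (Spec_fix_missing_brackets expression out) := by unfold Spec_fix_missing_brackets; infer_instance

-- ===== CLAIM (what is proved, stated in full; the proofs are below) =====
def Claim_equal_fix_missing_brackets : Prop := ∀ (expression : String), Dom_fix_missing_brackets expression → Spec_fix_missing_brackets expression (fix_missing_brackets expression)

-- ===== LEMMAS AND PROOFS =====

/-- Abstract machine both proofs factor through: state = (depth surplus, pending count). -/
def fmbStepD (s : Int × Nat) (ch : Char) : Int × Nat :=
  if ch = '(' then (s.1 + 1, s.2)
  else if ch = ')' then if s.1 > 0 then (s.1 - 1, s.2) else (s.1, s.2 + 1)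
  else s

lemma fmbStepD_nonneg (s : Int × Nat) (ch : Char) (h : 0 ≤ s.1) :
    0 ≤ (fmbStepD s ch).1 := by
  unfold fmbStepD; split_ifs <;> (try dsimp only) <;> omega

/-- A's full fold is tracked by the abstract machine. -/
lemma fmb_A_abs (l : List Char) (o c : Int) (p : List Char) (d : Int) (pc : Nat)
    (hd : o - c = d) (hp : p = List.replicate pc '(') (h0 : 0 ≤ d) :
    (l.foldl fmbStepA (o, c, p)).1 - (l.foldl fmbStepA (o, c, p)).2.1
        = (l.foldl fmbStepD (d, pc)).1
    ∧ (l.foldl fmbStepA (o, c, p)).2.2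
        = List.replicate (l.foldl fmbStepD (d, pc)).2 '(' := by
  induction l generalizing o c p d pc with
  | nil => exact ⟨hd, hp⟩
  | cons ch t ih =>
    simp only [List.foldl_cons]
    by_cases hop : ch = '('
    · simp only [fmbStepA, fmbStepD, hop, if_pos rfl]
      exact ih (o + 1) c p (d + 1) pc (by omega) hp (by omega)
    · by_cases hcl : ch = ')'
      · simp only [fmbStepA, fmbStepD, hcl, if_neg hop, if_pos rfl]
        by_cases hgt : o > c
        · have hdg : d > 0 := by omega
          simp only [if_pos hgt, if_pos hdg]
          exact ih o (c + 1) p (d - 1) pc (by omega) hp (by omega)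
        · have hdn : ¬ (d > 0) := by omega
          simp only [if_neg hgt, if_neg hdn]
          refine ih o c (p ++ ['(']) d (pc + 1) hd ?_ h0
          rw [hp, List.replicate_succ']
      · simp only [fmbStepA, fmbStepD, if_neg hop, if_neg hcl]
        exact ih o c p d pc hd hp h0

/-- Non-brackets are no-ops for the abstract machine: fold = fold over the bracket filter. -/
lemma fmbFoldD_filter (l : List Char) (s : Int × Nat) :
    (l.filter fmbIsBracket).foldl fmbStepD s = l.foldl fmbStepD s := by
  induction l generalizing s with
  | nil => rfl
  | cons c t ih =>
    by_cases hb : fmbIsBracket c = true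
    · simp [List.filter_cons, hb, ih]
    · have h1 : c ≠ '(' := by intro h'; exact hb (by simp [fmbIsBracket, h'])
      have h2 : c ≠ ')' := by intro h'; exact hb (by simp [fmbIsBracket, h'])
      have hs : fmbStepD s c = s := by simp [fmbStepD, h1, h2]
      simp [List.filter_cons, hb, ih, hs]

/-- Deleting matched '()' pairs does not change the abstract fold (depth stays ≥ 0). -/
lemma fmbFoldD_repl (l : List Char) (s : Int × Nat) (h : 0 ≤ s.1) :
    (fmbRepl l).foldl fmbStepD s = l.foldl fmbStepD s := by
  fun_induction fmbRepl l generalizing s with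
  | case1 t ih =>
    have hstep : fmbStepD (fmbStepD s '(') ')' = s := by
      have hne : ('(' : Char) ≠ ')' := by decide
      simp only [fmbStepD, if_pos rfl, if_neg hne]
      have hpos : s.1 + 1 > 0 := by omega
      simp [hpos]
    simp only [List.foldl_cons, hstep]
    exact ih s h
  | case2 c t hne ih =>
    simp only [List.foldl_cons]
    exact ih _ (fmbStepD_nonneg s c h)
  | case3 => rfl

lemma fmbFoldD_reduce (l : List Char) (s : Int × Nat) (h : 0 ≤ s.1) :
    (fmbReduce l).foldl fmbStepD s = l.foldl fmbStepD s := by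
  fun_induction fmbReduce l with
  | case1 l hp ih => rw [ih, fmbFoldD_repl l s h]
  | case2 l hp => rfl

lemma fmbReduce_noPair (l : List Char) : fmbHasPair (fmbReduce l) = false := by
  fun_induction fmbReduce l with
  | case1 l hp ih => exact ih
  | case2 l hp => simpa using hp

lemma fmbRepl_mem (l : List Char) (c : Char) (h : c ∈ fmbRepl l) : c ∈ l := by
  fun_induction fmbRepl l with
  | case1 t ih => simp_all
  | case2 a t hne ih =>
    simp only [List.mem_cons] at h ⊢
    rcases h with h | h
    · exact Or.inl h
    · exact Or.inr (ih h)
  | case3 => simp_all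

lemma fmbReduce_mem (l : List Char) (c : Char) (h : c ∈ fmbReduce l) : c ∈ l := by
  fun_induction fmbReduce l with
  | case1 l hp ih => exact fmbRepl_mem l c (ih h)
  | case2 l hp => exact h

lemma fmb_head_shape (a b : Nat) :
    (List.replicate a ')' ++ List.replicate b '(' : List Char).head? = some '(' → a = 0 := by
  cases a with
  | zero => intro _; rfl
  | succ n => intro h; simp [List.replicate_succ] at h

/-- A bracket string without an adjacent '()' is some ')...)' followed by '(...('. -/
lemma fmb_noPair_shape (l : List Char)
    (hb : ∀ c ∈ l, fmbIsBracket c = true) (hp : fmbHasPair l = false) :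
    l = List.replicate (l.count ')') ')' ++ List.replicate (l.count '(') '(' := by
  induction l with
  | nil => simp
  | cons c t ih =>
    have hbt : ∀ x ∈ t, fmbIsBracket x = true := fun x hx => hb x (List.mem_cons_of_mem _ hx)
    have hpt : fmbHasPair t = false := by
      cases t with
      | nil => rfl
      | cons b t' =>
        simp only [fmbHasPair, Bool.or_eq_false_iff] at hp
        exact hp.2
    have ht := ih hbt hpt
    have hc := hb c (by simp)
    simp only [fmbIsBracket, Bool.or_eq_true, decide_eq_true_eq] at hc
    rcases hc with hc | hc
    · subst hc
      have ha0 : t.count ')' = 0 := by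
        cases t with
        | nil => simp
        | cons b t' =>
          have hbne : b ≠ ')' := by
            intro hb'
            subst hb'
            simp [fmbHasPair] at hp
          have hbb := hbt b (by simp)
          simp only [fmbIsBracket, Bool.or_eq_true, decide_eq_true_eq] at hbb
          have hbopen : b = '(' := hbb.resolve_right hbne
          have hhead : (b :: t').head? = some '(' := by simp [hbopen]
          rw [ht] at hhead
          exact fmb_head_shape _ _ hhead
      have ht' : t = List.replicate (t.count '(') '(' := by
        conv_lhs => rw [ht]
        rw [ha0]
        simp
      have hc1 : (('(' :: t).count ')') = 0 := by
        rw [List.count_cons]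
        simp [ha0]
      have hc2 : (('(' :: t).count '(') = t.count '(' + 1 := by
        rw [List.count_cons]
        simp
      rw [hc1, hc2, List.replicate_succ]
      simp only [List.replicate_zero, List.nil_append]
      conv_lhs => rw [ht']
    · subst hc
      have hc1 : ((')' :: t).count ')') = t.count ')' + 1 := by
        rw [List.count_cons]; simp
      have hc2 : ((')' :: t).count '(') = t.count '(' := by
        rw [List.count_cons]; simp
      rw [hc1, hc2, List.replicate_succ, List.cons_append]
      conv_lhs => rw [ht]

lemma fmbFoldD_close (a : Nat) (pc : Nat) :
    (List.replicate a ')').foldl fmbStepD ((0 : Int), pc) = (0, pc + a) := by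
  induction a generalizing pc with
  | zero => rfl
  | succ n ih =>
    rw [List.replicate_succ, List.foldl_cons]
    have hne : (')' : Char) ≠ '(' := by decide
    have hstep : fmbStepD ((0 : Int), pc) ')' = (0, pc + 1) := by
      simp [fmbStepD, hne]
    rw [hstep, ih]
    simp only [Prod.mk.injEq, true_and]
    omega

lemma fmbFoldD_open (b : Nat) (d : Int) (pc : Nat) :
    (List.replicate b '(').foldl fmbStepD (d, pc) = (d + b, pc) := by
  induction b generalizing d with
  | zero => simp
  | succ n ih =>
    rw [List.replicate_succ, List.foldl_cons]
    have hstep : fmbStepD (d, pc) '(' = (d + 1, pc) := by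
      simp [fmbStepD]
    rw [hstep, ih]
    simp only [Prod.mk.injEq, and_true]
    push_cast
    ring

-- ===== VERDICT (by name: the statement is the Claim_ definition above) =====
theorem fix_missing_brackets_spec : Claim_equal_fix_missing_brackets := by
  intro expression _
  show _ = _
  unfold fix_missing_brackets fix_missing_brackets_alt
  simp only []
  obtain ⟨hd, hp⟩ := fmb_A_abs expression.toList 0 0 [] 0 0 rfl rfl le_rfl
  have hbr : ∀ c ∈ fmbReduce (expression.toList.filter fmbIsBracket), fmbIsBracket c = true := by
    intro c hcm
    exact List.of_mem_filter (fmbReduce_mem _ c hcm)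
  have hshape := fmb_noPair_shape _ hbr (fmbReduce_noPair _)
  have hfold : (fmbReduce (expression.toList.filter fmbIsBracket)).foldl fmbStepD (0, 0)
      = expression.toList.foldl fmbStepD (0, 0) := by
    rw [fmbFoldD_reduce _ _ le_rfl, fmbFoldD_filter]
  have hfold2 : (fmbReduce (expression.toList.filter fmbIsBracket)).foldl fmbStepD (0, 0)
      = (((fmbReduce (expression.toList.filter fmbIsBracket)).count '(' : Int),
         (fmbReduce (expression.toList.filter fmbIsBracket)).count ')') := by
    conv_lhs => rw [hshape]
    rw [List.foldl_append, fmbFoldD_close, fmbFoldD_open]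
    simp
  rw [hp, hd, ← hfold, hfold2]
  simp
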